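-- pv_equiv track=rewrite | github.com/tkimweston/CCI | cpmi_16.py | isSubset2
-- ===== SOURCE A (Python) =====
-- def isSubset2(a, b):
--     lettersInB = set()
--     for c in b:
--         lettersInB.add(c)
--
--     for c in a:
--         if c not in lettersInB:
--             return False
--     return True
--
-- b = [5, 6, 30, 45, 50, 60, 90]
--
-- a = [3, 3, 3, 3, 3, 3, 3, 3]
-- ===== SOURCE B (Python) =====
-- def isSubset2(a, b):
--     # Sort-and-merge: walk the two sorted, deduplicated sequences in parallel
--     # with a single cursor; no hash-set membership tests at all.
--     xs = sorted(set(a))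
--     ys = sorted(set(b))
--     i = 0
--     for x in xs:
--         while i < len(ys) and ys[i] < x:
--             i += 1
--         if i == len(ys) or ys[i] != x:
--             return False
--     return True
-- ===== Notes on version B (the rewrite author's own statement) =====
-- stated objective: alternative
-- what changed: Replaces the hash-set build plus per-element membership loop by a sort-then-merge scan: both inputs are deduplicated and sorted, then one cursor walks the sorted b alongside the sorted a, so subset-ness is decided by order comparisons instead of hashing.
import Mathlib
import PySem

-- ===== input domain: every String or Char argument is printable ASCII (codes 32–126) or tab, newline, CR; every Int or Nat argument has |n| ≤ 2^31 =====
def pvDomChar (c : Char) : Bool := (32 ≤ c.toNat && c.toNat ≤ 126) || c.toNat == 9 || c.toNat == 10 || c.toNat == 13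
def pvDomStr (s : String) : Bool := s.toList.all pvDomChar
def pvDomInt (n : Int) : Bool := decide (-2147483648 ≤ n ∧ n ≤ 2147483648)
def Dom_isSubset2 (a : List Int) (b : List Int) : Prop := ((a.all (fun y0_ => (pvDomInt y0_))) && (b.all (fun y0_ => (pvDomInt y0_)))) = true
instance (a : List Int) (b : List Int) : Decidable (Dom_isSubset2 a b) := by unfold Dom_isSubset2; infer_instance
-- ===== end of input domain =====

-- B replaces A's hash-set build + membership loop by a sort-then-merge scan over both sorted deduplicated lists (alternative algorithm).

-- ===== PORT A =====
-- the 'for c in a: if c not in lettersInB: return False' loop, early return and all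
def isSubset2Loop (lettersInB : PySem.Set Int) : List Int → Bool
  | [] => true
  | c :: rest => if !(PySem.Set.contains lettersInB c) then false else isSubset2Loop lettersInB rest

def isSubset2 (a : List Int) (b : List Int) : Bool :=
  let lettersInB := b.foldl PySem.Set.add PySem.Set.empty
  isSubset2Loop lettersInB a

-- ===== PORT B =====
-- the 'for x in xs' loop; the cursor i over ys is represented by the suffix ys[i:],
-- and the inner 'while … ys[i] < x: i += 1' is that suffix's dropWhile (· < x)
def isSubset2Walk : List Int → List Int → Bool
  | [], _ => true
  | x :: xs, ys =>
      let ys' := ys.dropWhile (fun y => decide (y < x))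
      match ys' with
      | [] => false
      | y :: _ => if y ≠ x then false else isSubset2Walk xs ys'

def isSubset2_alt (a : List Int) (b : List Int) : Bool :=
  let xs := PySem.List.sorted (PySem.Set.ofList a) (fun x => x) false
  let ys := PySem.List.sorted (PySem.Set.ofList b) (fun x => x) false
  isSubset2Walk xs ys

-- ===== PRECONDITION & SPEC =====
def Spec_isSubset2 (a : List Int) (b : List Int) (out : Bool) : Prop := out = isSubset2_alt a b
instance (a : List Int) (b : List Int) (out : Bool) : Decidable (Spec_isSubset2 a b out) := by unfold Spec_isSubset2; infer_instance

-- ===== CLAIM (what is proved, stated in full; the proofs are below) =====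
def Claim_equal_isSubset2 : Prop := ∀ (a : List Int) (b : List Int), Dom_isSubset2 a b → Spec_isSubset2 a b (isSubset2 a b)

-- ===== LEMMAS AND PROOFS =====
theorem isSubset2Loop_eq_true_iff (s : PySem.Set Int) (l : List Int) :
    isSubset2Loop s l = true ↔ ∀ x ∈ l, x ∈ s := by
  induction l with
  | nil => simp [isSubset2Loop]
  | cons c rest ih => simp [isSubset2Loop, ih, PySem.Set.contains]

theorem mem_dropWhile_lt {x z : Int} (ys : List Int) (hz : z ∈ ys) (hxz : x ≤ z) :
    z ∈ ys.dropWhile (fun y => decide (y < x)) := by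
  induction ys with
  | nil => simp at hz
  | cons y t ih =>
    by_cases hy : y < x
    · rcases List.mem_cons.1 hz with h | h
      · omega
      · simpa [List.dropWhile, hy] using ih h
    · simpa [List.dropWhile, hy] using hz

theorem isSubset2Walk_eq_true_iff (xs ys : List Int)
    (hxs : xs.Pairwise (· < ·)) (hys : ys.Pairwise (· < ·)) :
    isSubset2Walk xs ys = true ↔ ∀ x ∈ xs, x ∈ ys := by
  induction xs generalizing ys with
  | nil => simp [isSubset2Walk]
  | cons x xs ih =>
    have hxs' := (List.pairwise_cons.1 hxs).2
    have hxall := (List.pairwise_cons.1 hxs).1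
    set ys' := ys.dropWhile (fun y => decide (y < x)) with hys'def
    have hsub : ys'.Sublist ys := List.dropWhile_sublist _
    have hys'pw : ys'.Pairwise (· < ·) := hys.sublist hsub
    -- membership transfer from ys to ys' for any z ≥ x
    have hmem : ∀ z : Int, x ≤ z → (z ∈ ys' ↔ z ∈ ys) := by
      intro z hxz
      exact ⟨fun h => hsub.mem h, fun h => mem_dropWhile_lt ys h hxz⟩
    cases hcase : ys' with
    | nil =>
      simp only [isSubset2Walk, hys'def.symm, hcase]
      constructor
      · intro h; cases h
      · intro h
        have hx : x ∈ ys := h x (List.mem_cons_self)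
        have : x ∈ ys' := (hmem x le_rfl).2 hx
        simp [hcase] at this
    | cons y t =>
      have hyx : ¬ (y < x) := by
        have := List.head?_dropWhile_not (fun y => decide (y < x)) ys
        rw [← hys'def, hcase] at this
        simpa using this
      simp only [isSubset2Walk, hys'def.symm, hcase]
      by_cases hxy : y = x
      · subst hxy
        have hpw := hys'pw
        rw [hcase] at hpw
        have htall := (List.pairwise_cons.1 hpw).1
        simp only [ne_eq, not_true_eq_false, if_false]
        rw [← hcase, ih ys' hxs' hys'pw]
        constructor
        · intro hall z hz
          rcases List.mem_cons.1 hz with h | h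
          · subst h; exact (hmem z le_rfl).1 (hcase ▸ List.mem_cons_self)
          · exact (hmem z (le_of_lt (hxall z h))).1 (hcase ▸ hall z h)
        · intro hall z hz
          have : z ∈ ys' := (hmem z (le_of_lt (hxall z hz))).2 (hall z (List.mem_cons_of_mem _ hz))
          exact hcase ▸ this
      · simp only [ne_eq, hxy, not_false_eq_true, if_true]
        constructor
        · intro h; cases h
        · intro h
          have hx : x ∈ ys' := (hmem x le_rfl).2 (h x List.mem_cons_self)
          rw [hcase] at hx
          rcases List.mem_cons.1 hx with h' | h'
          · exact absurd h'.symm hxy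
          · -- x in tail t, but every element of t is > y ≥ x : contradiction
            have hpw := hys'pw; rw [hcase] at hpw
            have := (List.pairwise_cons.1 hpw).1 x h'
            omega

-- ===== VERDICT (by name: the statement is the Claim_ definition above) =====
theorem isSubset2_spec : Claim_equal_isSubset2 := by
  intro a b _
  unfold Spec_isSubset2 isSubset2 isSubset2_alt
  rw [Bool.eq_iff_iff, isSubset2Loop_eq_true_iff,
      isSubset2Walk_eq_true_iff _ _ (PySem.List.sorted_ofList_pairwise_lt a)
        (PySem.List.sorted_ofList_pairwise_lt b),
      show PySem.Set.empty = ([] : PySem.Set Int) from rfl, ← PySem.Set.ofList_eq_foldl]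
  constructor
  · intro hall x hx
    have hxa : x ∈ a := (PySem.Set.mem_ofList a x).1 ((PySem.List.mem_sorted _ _ _ _).1 hx)
    exact (PySem.List.mem_sorted _ _ _ _).2 (hall x hxa)
  · intro hsub x hx
    have hxs : x ∈ PySem.List.sorted (PySem.Set.ofList a) (fun x => x) false :=
      (PySem.List.mem_sorted _ _ _ _).2 ((PySem.Set.mem_ofList a x).2 hx)
    exact (PySem.List.mem_sorted _ _ _ _).1 (hsub x hxs)
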